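-- pv_equiv track=rewrite | github.com/Josh-moreton/alchemiser-quant | the_alchemiser/shared/notifications/templates/signals.py | _truncate_with_arrows
-- ===== SOURCE A (Python) =====
-- def _truncate_with_arrows(parts: list[str], max_length: int) -> str:
--     """Truncate decision path parts while preserving complete nodes.
--
--     Args:
--         parts: List of decision path parts split by arrows
--         max_length: Maximum length before truncation
--
--     Returns:
--         Truncated string with preserved nodes and ellipsis
--
--     """
--     result_parts: list[str] = []
--     current_length = 0
--
--     for part in parts:
--         # Account for arrow separator (3 chars: " → ")
--         part_length = len(part) + (3 if result_parts else 0)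
--
--         if current_length + part_length <= max_length - 3:  # Reserve 3 for "..."
--             result_parts.append(part)
--             current_length += part_length
--         else:
--             break
--
--     if result_parts:
--         return " → ".join(result_parts) + "..."
--     return ""
-- ===== SOURCE B (Python) =====
-- def _truncate_with_arrows(parts: list[str], max_length: int) -> str:
--     """Prefix-sum table + binary search of the cutoff, instead of an
--     incremental running-counter loop with an early break."""
--     cum = []
--     total = 0
--     for part in parts:
--         total += len(part) + (3 if cum else 0)
--         cum.append(total)
--     budget = max_length - 3
--     lo, hi = 0, len(cum)
--     while lo < hi:
--         mid = (lo + hi) // 2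
--         if cum[mid] <= budget:
--             lo = mid + 1
--         else:
--             hi = mid
--     if lo == 0:
--         return ""
--     return " → ".join(parts[:lo]) + "..."
-- ===== Notes on version B (the rewrite author's own statement) =====
-- stated objective: alternative
-- what changed: Replaces A's incremental running-counter loop with early break by first building a prefix-sum table of per-part costs (len + 3 for each part after the first) and then binary-searching (bisect-style while-loop) the cutoff count n with cum[n-1] <= max_length - 3, returning ' → '.join(parts[:n]) + '...' if n > 0 else ''.
import Mathlib
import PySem

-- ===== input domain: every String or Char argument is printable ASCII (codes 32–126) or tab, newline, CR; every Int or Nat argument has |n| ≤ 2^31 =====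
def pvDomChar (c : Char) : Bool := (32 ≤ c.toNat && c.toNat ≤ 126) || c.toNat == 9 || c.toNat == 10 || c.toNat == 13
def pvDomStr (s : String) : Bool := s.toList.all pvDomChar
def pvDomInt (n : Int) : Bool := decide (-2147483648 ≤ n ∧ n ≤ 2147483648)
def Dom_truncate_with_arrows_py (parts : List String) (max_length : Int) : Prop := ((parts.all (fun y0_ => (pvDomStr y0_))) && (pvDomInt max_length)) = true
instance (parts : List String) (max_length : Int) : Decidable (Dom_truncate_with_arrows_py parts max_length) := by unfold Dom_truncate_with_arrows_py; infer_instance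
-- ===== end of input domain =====

-- B replaces A's running-counter loop with early break by a prefix-sum table plus a
-- binary search for the cutoff index (alternative decomposition, same results).

-- ===== PORT A =====
-- the for-loop of A with its early `break`, carrying (result_parts, current_length)
def pvLoopA (max_length : Int) : List String → List String → Int → List String
  | [], result_parts, _ => result_parts
  | part :: rest, result_parts, current_length =>
    let part_length := PySem.Str.len part + (if result_parts ≠ [] then 3 else 0)
    if current_length + part_length ≤ max_length - 3 then
      pvLoopA max_length rest (result_parts ++ [part]) (current_length + part_length)
    else result_parts

def truncate_with_arrows_py (parts : List String) (max_length : Int) : String :=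
  let result_parts := pvLoopA max_length parts [] 0
  if result_parts ≠ [] then PySem.Str.join " → " result_parts ++ "..." else ""

-- ===== PORT B =====
-- the cum-building loop of Source B, carrying (cum, total)
def pvCumB : List String → List Int → Int → List Int
  | [], cum, _ => cum
  | part :: rest, cum, total =>
    let t := total + PySem.Str.len part + (if cum ≠ [] then 3 else 0)
    pvCumB rest (cum ++ [t]) t

-- Source B's `while lo < hi` binary search; cum[mid] is always in range (lo ≤ mid < hi ≤ len),
-- so List.getD is exact here; lo, hi are nonnegative ints, kept as Nat ((lo+hi)//2 = Nat division)
def pvBisectB (cum : List Int) (budget : Int) (lo hi : Nat) : Nat :=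
  if _h : lo < hi then
    let mid := (lo + hi) / 2
    if cum.getD mid 0 ≤ budget then pvBisectB cum budget (mid + 1) hi
    else pvBisectB cum budget lo mid
  else lo
termination_by hi - lo
decreasing_by all_goals omega

def truncate_with_arrows_py_alt (parts : List String) (max_length : Int) : String :=
  let cum := pvCumB parts [] 0
  let budget := max_length - 3
  let lo := pvBisectB cum budget 0 cum.length
  if lo = 0 then "" else PySem.Str.join " → " (parts.take lo) ++ "..."

-- ===== PRECONDITION & SPEC =====
def Spec_truncate_with_arrows_py (parts : List String) (max_length : Int) (out : String) : Prop := out = truncate_with_arrows_py_alt parts max_length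
instance (parts : List String) (max_length : Int) (out : String) : Decidable (Spec_truncate_with_arrows_py parts max_length out) := by unfold Spec_truncate_with_arrows_py; infer_instance

-- ===== CLAIM (what is proved, stated in full; the proofs are below) =====
def Claim_equal_truncate_with_arrows_py : Prop := ∀ (parts : List String) (max_length : Int), Dom_truncate_with_arrows_py parts max_length → Spec_truncate_with_arrows_py parts max_length (truncate_with_arrows_py parts max_length)

-- ===== LEMMAS AND PROOFS =====

-- prefix sums of a cost list starting from a running total t
def pvPsums : List Int → Int → List Int
  | [], _ => []
  | c :: cs, t => (t + c) :: pvPsums cs (t + c)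

-- greedy count: how many leading costs fit into budget b
def pvGreedy : List Int → Int → Nat
  | [], _ => 0
  | c :: cs, b => if c ≤ b then pvGreedy cs (b - c) + 1 else 0

-- per-part cost list: first part free of the separator, later parts pay 3 for " → "
def pvCosts : List String → List Int
  | [] => []
  | p :: rest => PySem.Str.len p :: rest.map (fun q => PySem.Str.len q + 3)

theorem pvLen_nonneg (s : String) : 0 ≤ PySem.Str.len s := by
  simp [PySem.Str.len_eq]

theorem pvCosts_nonneg (parts : List String) : ∀ c ∈ pvCosts parts, 0 ≤ c := by
  cases parts with
  | nil => simp [pvCosts]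
  | cons p rest =>
    simp only [pvCosts, List.mem_cons, List.mem_map]
    rintro c (rfl | ⟨q, _, rfl⟩)
    · exact pvLen_nonneg p
    · have := pvLen_nonneg q; linarith

theorem pvPsums_length (cs : List Int) (t : Int) : (pvPsums cs t).length = cs.length := by
  induction cs generalizing t with
  | nil => simp [pvPsums]
  | cons c cs ih => simp [pvPsums, ih]

theorem pvPsums_lb (cs : List Int) (t : Int) (h : ∀ c ∈ cs, 0 ≤ c) :
    ∀ i < cs.length, t ≤ (pvPsums cs t).getD i 0 := by
  induction cs generalizing t with
  | nil => simp
  | cons c cs ih =>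
    intro i hi
    have hc : 0 ≤ c := h c (by simp)
    cases i with
    | zero => simp [pvPsums]; linarith
    | succ i =>
      have := ih (t + c) (fun x hx => h x (by simp [hx])) i (by simpa using hi)
      simp only [pvPsums, List.getD_cons_succ]
      linarith

theorem pvPsums_mono (cs : List Int) (t : Int) (h : ∀ c ∈ cs, 0 ≤ c) :
    ∀ i j, i ≤ j → j < cs.length → (pvPsums cs t).getD i 0 ≤ (pvPsums cs t).getD j 0 := by
  induction cs generalizing t with
  | nil => simp
  | cons c cs ih =>
    intro i j hij hj
    cases i with
    | zero =>
      cases j with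
      | zero => exact le_refl _
      | succ j =>
        simp only [pvPsums, List.getD_cons_zero, List.getD_cons_succ]
        exact pvPsums_lb cs (t + c) (fun x hx => h x (by simp [hx])) j (by simpa using hj)
    | succ i =>
      cases j with
      | zero => omega
      | succ j =>
        simp only [pvPsums, List.getD_cons_succ]
        exact ih (t + c) (fun x hx => h x (by simp [hx])) i j (by omega) (by simpa using hj)

theorem pvGreedy_le_length (cs : List Int) (b : Int) : pvGreedy cs b ≤ cs.length := by
  induction cs generalizing b with
  | nil => simp [pvGreedy]
  | cons c cs ih =>
    simp only [pvGreedy, List.length_cons]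
    split
    · have := ih (b - c); omega
    · omega

theorem pvGreedy_neg (cs : List Int) (b : Int) (h : ∀ c ∈ cs, 0 ≤ c) (hb : b < 0) :
    pvGreedy cs b = 0 := by
  cases cs with
  | nil => rfl
  | cons c cs =>
    have hc : 0 ≤ c := h c (by simp)
    simp only [pvGreedy]
    rw [if_neg (by linarith)]

-- the greedy count marks exactly the switch point of the prefix sums over the budget
theorem pvGreedy_good (cs : List Int) (b : Int) (h : ∀ c ∈ cs, 0 ≤ c) :
    ∀ t, (∀ i < pvGreedy cs (b - t), (pvPsums cs t).getD i 0 ≤ b) ∧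
      (∀ i, pvGreedy cs (b - t) ≤ i → i < cs.length → b < (pvPsums cs t).getD i 0) := by
  induction cs with
  | nil => intro t; exact ⟨by simp [pvGreedy], by simp⟩
  | cons c cs ih =>
    intro t
    have htail : ∀ x ∈ cs, 0 ≤ x := fun x hx => h x (by simp [hx])
    have hc : 0 ≤ c := h c (by simp)
    have hbud : b - t - c = b - (t + c) := by ring
    by_cases hcb : c ≤ b - t
    · simp only [pvGreedy, if_pos hcb]
      obtain ⟨ih1, ih2⟩ := ih htail (t + c)
      constructor
      · intro i hi
        cases i with
        | zero => simp only [pvPsums, List.getD_cons_zero]; linarith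
        | succ i =>
          simp only [pvPsums, List.getD_cons_succ]
          exact ih1 i (by rw [← hbud]; omega)
      · intro i hge hlen
        cases i with
        | zero => omega
        | succ i =>
          simp only [pvPsums, List.getD_cons_succ]
          exact ih2 i (by rw [← hbud]; omega) (by simpa using hlen)
    · simp only [pvGreedy, if_neg hcb]
      refine ⟨by omega, ?_⟩
      intro i _ hlen
      cases i with
      | zero => simp only [pvPsums, List.getD_cons_zero]; linarith
      | succ i =>
        simp only [pvPsums, List.getD_cons_succ]
        obtain ⟨_, ih2⟩ := ih htail (t + c)
        have hz : pvGreedy cs (b - (t + c)) = 0 :=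
          pvGreedy_neg cs _ htail (by linarith)
        exact ih2 i (by omega) (by simpa using hlen)

-- the binary search lands on the same switch point
theorem pvBisect_fuel (cum : List Int) (b : Int)
    (mono : ∀ i j, i ≤ j → j < cum.length → cum.getD i 0 ≤ cum.getD j 0) :
    ∀ fuel lo hi, hi - lo ≤ fuel → lo ≤ hi → hi ≤ cum.length →
      (∀ i < lo, cum.getD i 0 ≤ b) → (∀ i, hi ≤ i → i < cum.length → b < cum.getD i 0) →
      (∀ i < pvBisectB cum b lo hi, cum.getD i 0 ≤ b) ∧
      (∀ i, pvBisectB cum b lo hi ≤ i → i < cum.length → b < cum.getD i 0) ∧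
      pvBisectB cum b lo hi ≤ cum.length := by
  intro fuel
  induction fuel with
  | zero =>
    intro lo hi hf hle hhl hlo hhi
    have : lo = hi := by omega
    subst this
    rw [pvBisectB, dif_neg (by omega)]
    exact ⟨hlo, fun i hi1 hi2 => hhi i hi1 hi2, by omega⟩
  | succ fuel ih =>
    intro lo hi hf hle hhl hlo hhi
    rw [pvBisectB]
    by_cases hlt : lo < hi
    · rw [dif_pos hlt]
      by_cases hmid : cum.getD ((lo + hi) / 2) 0 ≤ b
      · simp only [if_pos hmid]
        refine ih ((lo + hi) / 2 + 1) hi (by omega) (by omega) hhl ?_ hhi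
        intro i hi2
        exact le_trans (mono i ((lo + hi) / 2) (by omega) (by omega)) hmid
      · simp only [if_neg hmid]
        refine ih lo ((lo + hi) / 2) (by omega) (by omega) (by omega) hlo ?_
        intro i hi1 hi2
        have := mono ((lo + hi) / 2) i hi1 hi2
        omega
    · rw [dif_neg hlt]
      have : lo = hi := by omega
      subst this
      exact ⟨hlo, fun i hi1 hi2 => hhi i hi1 hi2, by omega⟩

-- the switch point is unique
theorem pvGood_unique (cum : List Int) (b : Int) (n1 n2 : Nat)
    (h1a : ∀ i < n1, cum.getD i 0 ≤ b) (h1b : ∀ i, n1 ≤ i → i < cum.length → b < cum.getD i 0)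
    (h2a : ∀ i < n2, cum.getD i 0 ≤ b) (h2b : ∀ i, n2 ≤ i → i < cum.length → b < cum.getD i 0)
    (hn1 : n1 ≤ cum.length) (hn2 : n2 ≤ cum.length) : n1 = n2 := by
  rcases Nat.lt_trichotomy n1 n2 with h | h | h
  · have ha := h2a n1 h
    have hb := h1b n1 (le_refl _) (by omega)
    omega
  · exact h
  · have ha := h1a n2 h
    have hb := h2b n2 (le_refl _) (by omega)
    omega

theorem pvCumB_nonempty (rest : List String) :
    ∀ cum t, cum ≠ [] →
      pvCumB rest cum t = cum ++ pvPsums (rest.map (fun q => PySem.Str.len q + 3)) t := by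
  induction rest with
  | nil => intro cum t _; simp [pvCumB, pvPsums]
  | cons p rest ih =>
    intro cum t hc
    simp only [pvCumB, List.map_cons, pvPsums, if_pos hc, ne_eq]
    rw [ih (cum ++ [t + PySem.Str.len p + 3]) _ (by simp)]
    simp [List.append_assoc, add_assoc]

theorem pvCumB_eq (parts : List String) : pvCumB parts [] 0 = pvPsums (pvCosts parts) 0 := by
  cases parts with
  | nil => rfl
  | cons p rest =>
    simp only [pvCumB, pvCosts, pvPsums]
    norm_num
    rw [pvCumB_nonempty rest _ _ (by simp)]
    simp

theorem pvLoopA_nonempty (ml : Int) (rest : List String) :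
    ∀ acc cur, acc ≠ [] →
      pvLoopA ml rest acc cur =
        acc ++ rest.take (pvGreedy (rest.map (fun q => PySem.Str.len q + 3)) (ml - 3 - cur)) := by
  induction rest with
  | nil => intro acc cur _; simp [pvLoopA, pvGreedy]
  | cons p rest ih =>
    intro acc cur hacc
    simp only [pvLoopA, List.map_cons, pvGreedy, if_pos hacc]
    have hiff : (cur + (PySem.Str.len p + 3) ≤ ml - 3) ↔ (PySem.Str.len p + 3 ≤ ml - 3 - cur) := by
      constructor <;> intro <;> linarith
    by_cases hcond : cur + (PySem.Str.len p + 3) ≤ ml - 3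
    · rw [if_pos hcond, if_pos (hiff.mp hcond)]
      rw [ih (acc ++ [p]) _ (by simp)]
      have e : ml - 3 - (cur + (PySem.Str.len p + 3)) = ml - 3 - cur - (PySem.Str.len p + 3) := by
        ring
      rw [e]
      simp [List.take_succ_cons, List.append_assoc]
    · rw [if_neg hcond, if_neg (fun hx => hcond (hiff.mpr hx))]
      simp

-- A's loop on the whole list computes the greedy-count prefix
theorem pvLoopA_top (ml : Int) (parts : List String) :
    pvLoopA ml parts [] 0 = parts.take (pvGreedy (pvCosts parts) (ml - 3)) := by
  cases parts with
  | nil => simp [pvLoopA, pvCosts, pvGreedy]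
  | cons p rest =>
    simp only [pvLoopA, pvCosts, pvGreedy, ne_eq, not_true_eq_false]
    by_cases hc : PySem.Str.len p ≤ ml - 3
    · rw [if_pos (by simpa using hc), if_pos hc]
      norm_num
      rw [pvLoopA_nonempty ml rest [p] _ (by simp)]
      simp
    · rw [if_neg (by simpa using hc), if_neg hc]
      simp

-- ===== VERDICT (by name: the statement is the Claim_ definition above) =====
theorem truncate_with_arrows_py_spec : Claim_equal_truncate_with_arrows_py := by
  intro parts ml _
  unfold Spec_truncate_with_arrows_py truncate_with_arrows_py truncate_with_arrows_py_alt
  have hnn := pvCosts_nonneg parts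
  have hlenps := pvPsums_length (pvCosts parts) 0
  have hmono : ∀ i j, i ≤ j → j < (pvPsums (pvCosts parts) 0).length →
      (pvPsums (pvCosts parts) 0).getD i 0 ≤ (pvPsums (pvCosts parts) 0).getD j 0 := by
    intro i j hij hj
    exact pvPsums_mono (pvCosts parts) 0 hnn i j hij (by omega)
  have hbis := pvBisect_fuel (pvPsums (pvCosts parts) 0) (ml - 3) hmono
    (pvPsums (pvCosts parts) 0).length 0 (pvPsums (pvCosts parts) 0).length
    (le_refl _) (by omega) (le_refl _) (by omega) (by omega)
  have hgd := pvGreedy_good (pvCosts parts) (ml - 3) hnn 0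
  rw [sub_zero] at hgd
  have hm_le : pvGreedy (pvCosts parts) (ml - 3) ≤ (pvPsums (pvCosts parts) 0).length := by
    have := pvGreedy_le_length (pvCosts parts) (ml - 3)
    omega
  have hn_eq : pvBisectB (pvPsums (pvCosts parts) 0) (ml - 3) 0 (pvPsums (pvCosts parts) 0).length
      = pvGreedy (pvCosts parts) (ml - 3) := by
    refine pvGood_unique (pvPsums (pvCosts parts) 0) (ml - 3) _ _
      hbis.1 hbis.2.1 hgd.1 (fun i h1 h2 => hgd.2 i h1 (by omega)) hbis.2.2 hm_le
  simp only [pvCumB_eq, pvLoopA_top]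
  rw [hn_eq]
  have hlen_costs : (pvCosts parts).length = parts.length := by
    cases parts <;> simp [pvCosts]
  by_cases hz : pvGreedy (pvCosts parts) (ml - 3) = 0
  · simp [hz]
  · have htake : parts.take (pvGreedy (pvCosts parts) (ml - 3)) ≠ [] := by
      intro hnil
      rw [List.take_eq_nil_iff] at hnil
      rcases hnil with h | h
      · exact hz h
      · subst h; simp [pvCosts, pvGreedy] at hz
    rw [if_pos htake, if_neg hz]
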